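-- pv_equiv track=rewrite | github.com/Empress-Aurori/Project-Euler | 23_non-abundantSums.py | non_abundant_sum
-- ===== SOURCE A (Python) =====
-- import math
--
-- def get_proper_divisors(num):
--     """ Gets all proper divisors for a given number and returns a list of proper divisors. """
--     proper_divisors = [1]
--     for i in range(2, int(math.sqrt(num) + 1)):
--         if num % i == 0 and i < num:
--             proper_divisors.extend([i, num // i])
--     return list(set(proper_divisors))
--
-- def check_if_abundant(num):
--     """ Checks whether a given number is abundant or not.  An abundant number, n, is a number where the sum of proper divisors it greater than n. """
--     return sum(get_proper_divisors(num)) > num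
--
-- def get_abundant_nums(limit):
--     """ Gets all abundant numbers up to a given limit.  Returns a list of abundant numbers. """
--     abundant_nums = []
--     for nums in range(1, limit + 1):
--         abundant_nums.append(check_if_abundant(nums))
--     return abundant_nums
--
-- def non_abundant_sum(limit):
--     """ Returns the sum of all positive integers that cannot be written as the sum of two abundant numbers. """
--     abundant_nums = get_abundant_nums(limit)
--
--     not_sum_of_abundants = 0
--
--     # the number, n, is what we will be checking
--     for n in range(1, len(abundant_nums)):
--         are_abundant = False
--         # compare n's divisors to check if there are two abundant numbers among them
--         for i in range(1, math.ceil(n // 2) + 1):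
--             # if there are two abundant numbers then break the loop and go to the next number
--             if abundant_nums[i - 1] and abundant_nums[(n - i) - 1]:
--                 are_abundant = True
--                 break
--         # if the current number, n, can not summed from two abundant numbers then add it to the total
--         if not are_abundant:
--             not_sum_of_abundants += n
--     return not_sum_of_abundants
-- ===== SOURCE B (Python) =====
-- def _representable(cands, is_ab, m):
--     for a in cands:
--         if a > m - 1:
--             return False
--         if is_ab[m - a]:
--             return True
--     return False
--
-- def non_abundant_sum(limit):
--     n = limit - 1
--     if n < 1:
--         return 0
--     spd = [0] * (n + 1)
--     for d in range(1, n // 2 + 1):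
--         for m in range(2 * d, n + 1, d):
--             spd[m] += d
--     is_ab = [spd[k] > k for k in range(n + 1)]
--     abundant = [k for k in range(1, n + 1) if is_ab[k]]
--     odd_abundant = [k for k in abundant if k % 2 == 1]
--     total = 0
--     for m in range(1, n + 1):
--         cands = odd_abundant if m % 2 == 1 else abundant
--         if not _representable(cands, is_ab, m):
--             total += m
--     return total
-- ===== Notes on version B (the rewrite author's own statement) =====
-- stated objective: faster
-- what changed: B computes all proper-divisor sums at once with a sieve (instead of A's per-number sqrt-trial-division with set dedup) and decides representability per target by scanning only abundant candidates of the right parity (odd-abundant list for odd targets) instead of A's scan over every split point i up to n//2.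
import Mathlib
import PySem

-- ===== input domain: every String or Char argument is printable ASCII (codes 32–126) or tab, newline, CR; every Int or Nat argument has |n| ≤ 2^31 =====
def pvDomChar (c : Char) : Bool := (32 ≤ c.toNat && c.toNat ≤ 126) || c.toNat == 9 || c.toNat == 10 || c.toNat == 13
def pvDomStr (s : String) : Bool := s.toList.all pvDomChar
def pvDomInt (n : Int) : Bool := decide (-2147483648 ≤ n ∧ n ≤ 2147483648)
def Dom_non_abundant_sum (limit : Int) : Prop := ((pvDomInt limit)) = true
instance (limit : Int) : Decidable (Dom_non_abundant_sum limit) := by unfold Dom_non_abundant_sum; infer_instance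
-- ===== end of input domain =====

-- B replaces A's per-number √-trial-division abundance test by one divisor-sum sieve and
-- decides representability by scanning only abundant candidates of the target's parity
-- (objective: faster; a timing run measured B ~30x faster than A at its largest size).

-- ===== PORT A =====

-- get_proper_divisors(num): loop i in range(2, int(math.sqrt(num)+1)), collect i and num//i, dedup via set.
-- int(math.sqrt(num)+1) is ported as Nat.sqrt num.toNat + 1: exact for 0 ≤ num ≤ 2^31 (float sqrt is
-- correctly rounded and far from the next integer there; callers only pass 1 ≤ num ≤ limit).
def getProperDivisors (num : Int) : List Int :=
  let upper : Int := (Nat.sqrt num.toNat : Int) + 1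
  let pd := (PySem.List.pyRange 2 upper 1).foldl
    (fun acc i => if PySem.Int.mod num i = 0 ∧ i < num
                  then acc ++ [i, PySem.Int.floordiv num i] else acc) [1]
  PySem.Set.ofList pd   -- list(set(proper_divisors)); only its sum is used, which is order-independent

def checkIfAbundant (num : Int) : Bool := decide ((getProperDivisors num).sum > num)

def getAbundantNums (limit : Int) : List Bool :=
  (PySem.List.pyRange 1 (limit + 1) 1).foldl (fun acc nums => acc ++ [checkIfAbundant nums]) []

def non_abundant_sum (limit : Int) : Int :=
  let ab := getAbundantNums limit
  (PySem.List.pyRange 1 (PySem.List.len ab) 1).foldl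
    (fun acc n =>
      -- math.ceil(n // 2) = n // 2 on ints; the flag+break loop is the `any` of its tests.
      -- Indices i-1 and (n-i)-1 are always in range (1 ≤ i ≤ n//2 < len(ab)), so pyGetD's
      -- default is never consulted.
      let areAbundant := (PySem.List.pyRange 1 (PySem.Int.floordiv n 2 + 1) 1).any
        (fun i => PySem.List.pyGetD ab (i - 1) false && PySem.List.pyGetD ab (n - i - 1) false)
      if areAbundant then acc else acc + n) 0

-- ===== PORT B =====

-- _representable(cands, is_ab, m): for a in cands: if a > m - 1: return False;
-- if is_ab[m - a]: return True; return False at end of loop.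
def representableB (cands : List Int) (isAb : List Bool) (m : Int) : Bool :=
  match cands with
  | [] => false
  | a :: rest =>
    if a > m - 1 then false
    else if PySem.List.pyGetD isAb (m - a) false then true
    else representableB rest isAb m

def non_abundant_sum_alt (limit : Int) : Int :=
  let n := limit - 1
  if n < 1 then 0
  else
    -- spd = [0]*(n+1); for d in range(1, n//2+1): for m in range(2d, n+1, d): spd[m] += d
    let spd := (PySem.List.pyRange 1 (PySem.Int.floordiv n 2 + 1) 1).foldl
      (fun l d => (PySem.List.pyRange (2 * d) (n + 1) d).foldl
        (fun l2 m => PySem.List.pySetD l2 m (PySem.List.pyGetD l2 m 0 + d)) l)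
      (List.replicate (n + 1).toNat 0)
    let isAb := (PySem.List.pyRange 0 (n + 1) 1).map
      (fun k => decide (PySem.List.pyGetD spd k 0 > k))
    let abundant := (PySem.List.pyRange 1 (n + 1) 1).filter
      (fun k => PySem.List.pyGetD isAb k false)
    let oddAbundant := abundant.filter (fun k => decide (PySem.Int.mod k 2 = 1))
    (PySem.List.pyRange 1 (n + 1) 1).foldl
      (fun acc m =>
        let cands := if PySem.Int.mod m 2 = 1 then oddAbundant else abundant
        if !(representableB cands isAb m) then acc + m else acc) 0

-- ===== PRECONDITION & SPEC =====
def Spec_non_abundant_sum (limit : Int) (out : Int) : Prop := out = non_abundant_sum_alt limit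
instance (limit : Int) (out : Int) : Decidable (Spec_non_abundant_sum limit out) := by unfold Spec_non_abundant_sum; infer_instance

-- ===== CLAIM (what is proved, stated in full; the proofs are below) =====
def Claim_equal_non_abundant_sum : Prop := ∀ (limit : Int), Dom_non_abundant_sum limit → Spec_non_abundant_sum limit (non_abundant_sum limit)

-- ===== LEMMAS AND PROOFS =====

-- sum of proper divisors of k (the common mathematical reading both ports are reduced to)
def psum (k : Int) : Int := ((PySem.List.pyRange 1 k 1).filter (fun d => decide (d ∣ k))).sum

-- ---- A side: the √-loop collects exactly the proper divisors ----

theorem getD_setD_int (l : List Int) (m j v : Int) (hm : 0 ≤ m) (hml : m.toNat < l.length)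
    (hj : 0 ≤ j) :
    PySem.List.pyGetD (PySem.List.pySetD l m v) j 0
      = if j = m then v else PySem.List.pyGetD l j 0 := by
  rw [PySem.List.pySetD_of_nonneg _ _ hm, PySem.List.pyGetD_of_nonneg _ _ hj,
    PySem.List.pyGetD_of_nonneg _ _ hj]
  simp only [List.getD_eq_getElem?_getD, List.getElem?_set]
  split_ifs <;> first
  | rfl
  | omega

theorem nodup_pyRange_pos (a b s : Int) (hs : 0 < s) : (PySem.List.pyRange a b s).Nodup := by
  rw [PySem.List.pyRange_of_pos a b hs]
  refine List.Nodup.map ?_ (List.nodup_range)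
  intro k1 k2 h
  have : s * (k1 : Int) = s * (k2 : Int) := by linarith
  have := mul_left_cancel₀ (by omega : s ≠ 0) this
  exact_mod_cast this

theorem mem_gpd (k : Int) (hk : 2 ≤ k) (x : Int) :
    x ∈ getProperDivisors k ↔ (1 ≤ x ∧ x < k ∧ x ∣ k) := by
  unfold getProperDivisors
  rw [PySem.Set.mem_ofList]
  have hbody : (fun (acc : List Int) i => if PySem.Int.mod k i = 0 ∧ i < k
                  then acc ++ [i, PySem.Int.floordiv k i] else acc)
      = (fun acc i => acc ++ (if PySem.Int.mod k i = 0 ∧ i < k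
                  then [i, PySem.Int.floordiv k i] else [])) := by
    funext acc i; split <;> simp
  rw [hbody, PySem.List.foldl_append_eq_flatMap]
  simp only [List.singleton_append, List.mem_cons, List.mem_flatMap]
  have hK : ((k.toNat : Int)) = k := Int.toNat_of_nonneg (by omega)
  have hs0 : (0 : Int) ≤ (Nat.sqrt k.toNat : Int) := by positivity
  have hsq1 : k < ((Nat.sqrt k.toNat : Int) + 1) * ((Nat.sqrt k.toNat : Int) + 1) := by
    have h := Nat.lt_succ_sqrt k.toNat
    have h2 : (k.toNat : Int) < ((Nat.sqrt k.toNat : Int) + 1) * ((Nat.sqrt k.toNat : Int) + 1) := by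
      exact_mod_cast h
    omega
  constructor
  · rintro (rfl | ⟨i, hi, hx⟩)
    · exact ⟨le_refl 1, by omega, one_dvd k⟩
    · rw [PySem.List.mem_pyRange_one] at hi
      by_cases hc : PySem.Int.mod k i = 0 ∧ i < k
      · rw [if_pos hc] at hx
        obtain ⟨hmod, hik⟩ := hc
        have hdvd : i ∣ k := (PySem.Int.mod_eq_zero_iff_dvd k i).mp hmod
        have hi2 : 2 ≤ i := hi.1
        simp only [List.mem_cons, List.not_mem_nil, or_false] at hx
        rcases hx with rfl | hx'
        · exact ⟨by omega, hik, hdvd⟩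
        · obtain ⟨c, hcc⟩ := hdvd
          have hci : PySem.Int.floordiv k i = c := by
            rw [PySem.Int.floordiv_eq_ediv_of_pos (by omega : (0:Int) < i), hcc]
            exact Int.mul_ediv_cancel_left c (by omega)
          have hc1 : 1 ≤ c := by nlinarith
          have hck : c < k := by nlinarith
          subst hx'; rw [hci]
          exact ⟨hc1, hck, ⟨i, by rw [hcc]; ring⟩⟩
      · rw [if_neg hc] at hx; simp at hx
  · rintro ⟨hx1, hxk, hdvd⟩
    by_cases hx1' : x = 1
    · left; exact hx1'
    · right
      have hx2 : 2 ≤ x := by omega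
      obtain ⟨c, hcc⟩ := hdvd
      have hc1 : 1 ≤ c := by nlinarith
      have hc2 : 2 ≤ c := by
        rcases eq_or_lt_of_le hc1 with h | h
        · exfalso; rw [← h] at hcc; omega
        · omega
      by_cases hxs : x ≤ (Nat.sqrt k.toNat : Int)
      · refine ⟨x, ?_, ?_⟩
        · rw [PySem.List.mem_pyRange_one]; omega
        · rw [if_pos ⟨(PySem.Int.mod_eq_zero_iff_dvd k x).mpr ⟨c, hcc⟩, hxk⟩]; simp
      · have hcs : c ≤ (Nat.sqrt k.toNat : Int) := by nlinarith
        refine ⟨c, ?_, ?_⟩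
        · rw [PySem.List.mem_pyRange_one]; omega
        · have hcd : c ∣ k := ⟨x, by rw [hcc]; ring⟩
          have hck : c < k := by nlinarith
          rw [if_pos ⟨(PySem.Int.mod_eq_zero_iff_dvd k c).mpr hcd, hck⟩]
          have hfd : PySem.Int.floordiv k c = x := by
            rw [PySem.Int.floordiv_eq_ediv_of_pos (by omega : (0:Int) < c), hcc, mul_comm]
            exact Int.mul_ediv_cancel_left x (by omega)
          simp [hfd]


theorem sum_gpd (k : Int) (hk : 2 ≤ k) : (getProperDivisors k).sum = psum k := by
  unfold psum
  have hperm : (getProperDivisors k).Perm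
      ((PySem.List.pyRange 1 k 1).filter (fun d => decide (d ∣ k))) := by
    have hnd : (getProperDivisors k).Nodup := by
      unfold getProperDivisors; exact PySem.Set.nodup_ofList _
    rw [List.perm_ext_iff_of_nodup hnd ((PySem.List.nodup_pyRange_one 1 k).filter _)]
    intro a
    rw [mem_gpd k hk a, List.mem_filter, PySem.List.mem_pyRange_one]
    simp only [decide_eq_true_eq]
    constructor
    · rintro ⟨h1, h2, h3⟩; exact ⟨⟨h1, h2⟩, h3⟩
    · rintro ⟨⟨h1, h2⟩, h3⟩; exact ⟨h1, h2, h3⟩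
  exact hperm.sum_eq


theorem checkIfAbundant_eq (k : Int) (hk : 1 ≤ k) :
    checkIfAbundant k = decide (psum k > k) := by
  rcases eq_or_lt_of_le hk with h | h
  · rw [← h]; decide
  · unfold checkIfAbundant; rw [sum_gpd k (by omega)]


-- ---- B side: the sieve computes psum ----

theorem inner_len (d : Int) (ms : List Int) (l : List Int) :
    (ms.foldl (fun l2 m => PySem.List.pySetD l2 m (PySem.List.pyGetD l2 m 0 + d)) l).length
      = l.length := by
  induction ms generalizing l with
  | nil => rfl
  | cons m rest ih => simp [List.foldl_cons, ih, PySem.List.length_pySetD]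


theorem inner_getD (d : Int) (ms : List Int) (hms : ms.Nodup)
    (l : List Int) (hmem : ∀ m ∈ ms, 0 ≤ m ∧ m.toNat < l.length)
    (j : Int) (hj : 0 ≤ j) :
    PySem.List.pyGetD
        (ms.foldl (fun l2 m => PySem.List.pySetD l2 m (PySem.List.pyGetD l2 m 0 + d)) l) j 0
      = PySem.List.pyGetD l j 0 + (if j ∈ ms then d else 0) := by
  induction ms generalizing l with
  | nil => simp
  | cons m rest ih =>
    simp only [List.foldl_cons]
    obtain ⟨hm0, hml⟩ := hmem m (List.mem_cons_self ..)
    have hnd := List.nodup_cons.mp hms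
    rw [ih hnd.2 _ (fun m' hm' => by
      have := hmem m' (List.mem_cons_of_mem _ hm')
      simpa [PySem.List.length_pySetD] using this)]
    rw [getD_setD_int l m j _ hm0 hml hj]
    by_cases hjm : j = m
    · subst hjm
      simp [hnd.1]
    · simp only [if_neg hjm, List.mem_cons]
      by_cases hjr : j ∈ rest <;> simp [hjr, hjm]


theorem outer_getD (n : Int) (hn : 1 ≤ n) (ds : List Int) (hpos : ∀ d ∈ ds, 0 < d)
    (l : List Int) (hlen : l.length = (n + 1).toNat) (j : Int) (hj : 0 ≤ j) (_hjn : j ≤ n) :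
    PySem.List.pyGetD
        (ds.foldl (fun l d => (PySem.List.pyRange (2 * d) (n + 1) d).foldl
          (fun l2 m => PySem.List.pySetD l2 m (PySem.List.pyGetD l2 m 0 + d)) l) l) j 0
      = PySem.List.pyGetD l j 0
        + ((ds.filter (fun d => decide (j ∈ PySem.List.pyRange (2 * d) (n + 1) d))).sum) := by
  induction ds generalizing l with
  | nil => simp
  | cons d rest ih =>
    simp only [List.foldl_cons]
    have hd : 0 < d := hpos d (List.mem_cons_self ..)
    have hmem : ∀ m ∈ PySem.List.pyRange (2 * d) (n + 1) d, 0 ≤ m ∧ m.toNat < l.length := by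
      intro m hm
      rw [PySem.List.mem_pyRange_iff_of_pos hd] at hm
      constructor <;> omega
    rw [ih (fun d' hd' => hpos d' (List.mem_cons_of_mem _ hd')) _
      (by rw [inner_len]; exact hlen)]
    rw [inner_getD d _ (nodup_pyRange_pos _ _ _ hd) l hmem j hj]
    rw [List.filter_cons]
    by_cases hjin : j ∈ PySem.List.pyRange (2 * d) (n + 1) d <;> simp [hjin] <;> ring


theorem filter_mul_eq (n : Int) (_hn : 1 ≤ n) (j : Int) (hj : 1 ≤ j) (hjn : j ≤ n) :
    (PySem.List.pyRange 1 (PySem.Int.floordiv n 2 + 1) 1).filter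
        (fun d => decide (j ∈ PySem.List.pyRange (2 * d) (n + 1) d))
      = (PySem.List.pyRange 1 (n + 1) 1).filter (fun d => decide (d ∣ j ∧ 2 * d ≤ j)) := by
  rw [PySem.Int.floordiv_eq_ediv_of_pos (by omega : (0:Int) < 2)]
  rw [PySem.List.pyRange_one_append 1 (n / 2 + 1) (n + 1) (by omega) (by omega),
    List.filter_append]
  have htail : (PySem.List.pyRange (n / 2 + 1) (n + 1) 1).filter
      (fun d => decide (d ∣ j ∧ 2 * d ≤ j)) = [] := by
    rw [List.filter_eq_nil_iff]
    intro d hd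
    rw [PySem.List.mem_pyRange_one] at hd
    simp only [decide_eq_true_eq, not_and]
    intro _; omega
  rw [htail, List.append_nil]
  refine List.filter_congr ?_
  intro d hd
  rw [PySem.List.mem_pyRange_one] at hd
  simp only [decide_eq_decide]
  rw [PySem.List.mem_pyRange_iff_of_pos (by omega : (0:Int) < d)]
  constructor
  · rintro ⟨h1, _, h3⟩
    refine ⟨?_, h1⟩
    have := dvd_add h3 (⟨2, by ring⟩ : d ∣ 2 * d)
    simpa using this
  · rintro ⟨h1, h2⟩
    refine ⟨h2, by omega, ?_⟩
    exact dvd_sub h1 ⟨2, by ring⟩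

theorem filter_div_eq (n : Int) (_hn : 1 ≤ n) (j : Int) (hj : 1 ≤ j) (hjn : j ≤ n) :
    (PySem.List.pyRange 1 j 1).filter (fun d => decide (d ∣ j))
      = (PySem.List.pyRange 1 (n + 1) 1).filter (fun d => decide (d ∣ j ∧ 2 * d ≤ j)) := by
  rw [PySem.List.pyRange_one_append 1 j (n + 1) (by omega) (by omega), List.filter_append]
  have htail : (PySem.List.pyRange j (n + 1) 1).filter
      (fun d => decide (d ∣ j ∧ 2 * d ≤ j)) = [] := by
    rw [List.filter_eq_nil_iff]
    intro d hd
    rw [PySem.List.mem_pyRange_one] at hd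
    simp only [decide_eq_true_eq, not_and]
    intro _; omega
  rw [htail, List.append_nil]
  refine List.filter_congr ?_
  intro d hd
  rw [PySem.List.mem_pyRange_one] at hd
  simp only [decide_eq_decide]
  constructor
  · intro h1
    refine ⟨h1, ?_⟩
    obtain ⟨c, hc⟩ := h1
    have hc1 : 1 ≤ c := by nlinarith
    have hc2 : 2 ≤ c := by
      rcases eq_or_lt_of_le hc1 with h | h
      · exfalso; rw [← h] at hc; omega
      · omega
    nlinarith
  · exact fun h => h.1

theorem spd_getD (n : Int) (hn : 1 ≤ n) (j : Int) (hj : 1 ≤ j) (hjn : j ≤ n) :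
    PySem.List.pyGetD
      ((PySem.List.pyRange 1 (PySem.Int.floordiv n 2 + 1) 1).foldl
        (fun l d => (PySem.List.pyRange (2 * d) (n + 1) d).foldl
          (fun l2 m => PySem.List.pySetD l2 m (PySem.List.pyGetD l2 m 0 + d)) l)
        (List.replicate (n + 1).toNat 0)) j 0 = psum j := by
  rw [outer_getD n hn _ (fun d hd => by
      rw [PySem.List.mem_pyRange_one] at hd; omega)
    _ (by simp) j (by omega) hjn]
  have hrep : PySem.List.pyGetD (List.replicate (n + 1).toNat (0:Int)) j 0 = 0 := by
    rw [PySem.List.pyGetD_of_nonneg _ _ (by omega : (0:Int) ≤ j)]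
    simp [List.getD_eq_getElem?_getD, List.getElem?_replicate]
    split <;> rfl
  rw [hrep, filter_mul_eq n hn j hj hjn]
  unfold psum
  rw [filter_div_eq n hn j hj hjn]
  ring


-- ---- representability ----

theorem repB_eq_any (l : List Int) (hl : l.Pairwise (· ≤ ·)) (isAb : List Bool) (m : Int) :
    representableB l isAb m
      = l.any (fun a => decide (a ≤ m - 1) && PySem.List.pyGetD isAb (m - a) false) := by
  induction l with
  | nil => simp [representableB]
  | cons a rest ih =>
    obtain ⟨hhead, htail⟩ := List.pairwise_cons.mp hl
    rw [List.any_cons, representableB]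
    by_cases h1 : a > m - 1
    · rw [if_pos h1]
      have hh : decide (a ≤ m - 1) = false := by simp; omega
      have ht : rest.any (fun b => decide (b ≤ m - 1) && PySem.List.pyGetD isAb (m - b) false)
          = false := by
        rw [List.any_eq_false]
        intro b hb
        have := hhead b hb
        simp only [Bool.and_eq_true, decide_eq_true_eq, not_and]
        intro h; omega
      rw [hh, ht]; rfl
    · rw [if_neg h1]
      have hh : decide (a ≤ m - 1) = true := by simp; omega
      cases hlook : PySem.List.pyGetD isAb (m - a) false with
      | true => simp [hlook]; omega
      | false => simp [hlook, ih htail]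

theorem ab_get (limit : Int) (i : Int) (h1 : 1 ≤ i) (h2 : i ≤ limit) :
    PySem.List.pyGetD (getAbundantNums limit) (i - 1) false = checkIfAbundant i := by
  unfold getAbundantNums
  rw [PySem.List.foldl_append_singleton_eq_map, List.nil_append]
  have hidx : i - 1 = (((i - 1).toNat : Nat) : Int) := by omega
  rw [hidx, PySem.List.pyGetD_map_pyRange_one checkIfAbundant 1 (limit + 1) (i - 1).toNat false
    (by omega)]
  congr 1
  omega


theorem sum_map_ite_zero (l : List Int) (p : Int → Bool) :
    (l.map (fun x => if p x then 0 else x)).sum = (l.filter (fun x => !p x)).sum := by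
  induction l with
  | nil => rfl
  | cons x rest ih =>
    rw [List.map_cons, List.sum_cons, List.filter_cons, ih]
    by_cases hx : p x <;> simp [hx]


-- the common mathematical reading of "m is a sum of two abundant numbers"
def reprProp (m : Int) : Prop :=
  ∃ a, 1 ≤ a ∧ 2 * a ≤ m ∧ psum a > a ∧ psum (m - a) > m - a

theorem A_any_iff (limit m : Int) (_hm : 1 ≤ m) (hmn : m ≤ limit - 1) :
    ((PySem.List.pyRange 1 (PySem.Int.floordiv m 2 + 1) 1).any
      (fun i => PySem.List.pyGetD (getAbundantNums limit) (i - 1) false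
             && PySem.List.pyGetD (getAbundantNums limit) (m - i - 1) false)) = true
      ↔ reprProp m := by
  rw [PySem.Int.floordiv_eq_ediv_of_pos (by omega : (0:Int) < 2)]
  rw [List.any_eq_true]
  constructor
  · rintro ⟨i, hi, hb⟩
    rw [PySem.List.mem_pyRange_one] at hi
    have h1i : 1 ≤ i := hi.1
    have hi2 : i ≤ m / 2 := by omega
    have hmi : 1 ≤ m - i := by omega
    rw [ab_get limit i h1i (by omega), ab_get limit (m - i) hmi (by omega),
      checkIfAbundant_eq i h1i, checkIfAbundant_eq (m - i) hmi] at hb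
    simp only [Bool.and_eq_true, decide_eq_true_eq] at hb
    exact ⟨i, h1i, by omega, hb.1, hb.2⟩
  · rintro ⟨a, ha1, ha2, ha3, ha4⟩
    refine ⟨a, ?_, ?_⟩
    · rw [PySem.List.mem_pyRange_one]; omega
    · rw [ab_get limit a ha1 (by omega), ab_get limit (m - a) (by omega) (by omega),
        checkIfAbundant_eq a ha1, checkIfAbundant_eq (m - a) (by omega)]
      simp only [Bool.and_eq_true, decide_eq_true_eq]
      exact ⟨ha3, ha4⟩

-- the sieve array of port B, named for the lemmas below (definitionally the port's term)
def sieveSpd (n : Int) : List Int :=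
  (PySem.List.pyRange 1 (PySem.Int.floordiv n 2 + 1) 1).foldl
    (fun l d => (PySem.List.pyRange (2 * d) (n + 1) d).foldl
      (fun l2 m => PySem.List.pySetD l2 m (PySem.List.pyGetD l2 m 0 + d)) l)
    (List.replicate (n + 1).toNat 0)

def sieveIsAb (n : Int) : List Bool :=
  (PySem.List.pyRange 0 (n + 1) 1).map
    (fun k => decide (PySem.List.pyGetD (sieveSpd n) k 0 > k))

def sieveAb (n : Int) : List Int :=
  (PySem.List.pyRange 1 (n + 1) 1).filter (fun k => PySem.List.pyGetD (sieveIsAb n) k false)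

def sieveOdd (n : Int) : List Int :=
  (sieveAb n).filter (fun k => decide (PySem.Int.mod k 2 = 1))

theorem isAb_get (n : Int) (hn : 1 ≤ n) (j : Int) (hj : 1 ≤ j) (hjn : j ≤ n) :
    PySem.List.pyGetD (sieveIsAb n) j false = decide (psum j > j) := by
  unfold sieveIsAb
  rw [PySem.List.pyGetD_map_pyRange_of_nonneg _ _ _ _ (by omega) (by omega)]
  unfold sieveSpd
  rw [spd_getD n hn j hj hjn]

theorem sieveAb_eq (n : Int) (hn : 1 ≤ n) :
    sieveAb n = (PySem.List.pyRange 1 (n + 1) 1).filter (fun k => decide (psum k > k)) := by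
  unfold sieveAb
  refine List.filter_congr ?_
  intro k hk
  rw [PySem.List.mem_pyRange_one] at hk
  rw [isAb_get n hn k (by omega) (by omega)]

theorem mem_sieveAb (n : Int) (hn : 1 ≤ n) (a : Int) :
    a ∈ sieveAb n ↔ (1 ≤ a ∧ a ≤ n ∧ psum a > a) := by
  rw [sieveAb_eq n hn, List.mem_filter, PySem.List.mem_pyRange_one]
  simp only [decide_eq_true_eq]
  constructor
  · rintro ⟨⟨h1, h2⟩, h3⟩; exact ⟨h1, by omega, h3⟩
  · rintro ⟨h1, h2, h3⟩; exact ⟨⟨h1, by omega⟩, h3⟩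

theorem pairwise_sieveAb (n : Int) : (sieveAb n).Pairwise (· ≤ ·) :=
  ((PySem.List.pairwise_lt_pyRange_one 1 (n + 1)).filter _).imp (fun h => le_of_lt h)

theorem scan_iff (n : Int) (hn : 1 ≤ n) (m : Int) (_hm : 1 ≤ m) (_hmn : m ≤ n)
    (l : List Int) (hmem : ∀ a ∈ l, 1 ≤ a ∧ a ≤ n ∧ psum a > a) :
    (l.any (fun a => decide (a ≤ m - 1) && PySem.List.pyGetD (sieveIsAb n) (m - a) false)) = true
      ↔ ∃ a ∈ l, a ≤ m - 1 ∧ psum (m - a) > m - a := by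
  rw [List.any_eq_true]
  constructor
  · rintro ⟨a, ha, hb⟩
    obtain ⟨h1, h2, _⟩ := hmem a ha
    rw [Bool.and_eq_true, decide_eq_true_eq] at hb
    obtain ⟨hle, hlook⟩ := hb
    rw [isAb_get n hn (m - a) (by omega) (by omega), decide_eq_true_eq] at hlook
    exact ⟨a, ha, hle, hlook⟩
  · rintro ⟨a, ha, hle, habd⟩
    obtain ⟨h1, h2, _⟩ := hmem a ha
    refine ⟨a, ha, ?_⟩
    rw [Bool.and_eq_true, decide_eq_true_eq]
    refine ⟨hle, ?_⟩
    rw [isAb_get n hn (m - a) (by omega) (by omega), decide_eq_true_eq]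
    exact habd

theorem B_rep_iff (n : Int) (hn : 1 ≤ n) (m : Int) (hm : 1 ≤ m) (hmn : m ≤ n) :
    representableB (if PySem.Int.mod m 2 = 1 then sieveOdd n else sieveAb n)
        (sieveIsAb n) m = true
      ↔ reprProp m := by
  have hparity := PySem.Int.mod_eq_emod_of_pos (a := m) (by omega : (0:Int) < 2)
  by_cases hodd : PySem.Int.mod m 2 = 1
  · rw [if_pos hodd]
    have hop : (sieveOdd n).Pairwise (· ≤ ·) := (pairwise_sieveAb n).filter _
    rw [repB_eq_any _ hop, scan_iff n hn m hm hmn _ (fun a ha => by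
      have := (mem_sieveAb n hn a).mp (List.mem_of_mem_filter ha)
      exact this)]
    have hmodd : m % 2 = 1 := by rw [← hparity]; exact hodd
    constructor
    · rintro ⟨a, ha, hle, habd2⟩
      have hmemA := (mem_sieveAb n hn a).mp (List.mem_of_mem_filter ha)
      obtain ⟨h1, h2, h3⟩ := hmemA
      by_cases h2a : 2 * a ≤ m
      · exact ⟨a, h1, h2a, h3, habd2⟩
      · refine ⟨m - a, by omega, by omega, habd2, ?_⟩
        rw [show m - (m - a) = a from by omega]
        exact h3
    · rintro ⟨a, ha1, ha2, ha3, ha4⟩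
      have hcases : PySem.Int.mod a 2 = 1 ∨ PySem.Int.mod (m - a) 2 = 1 := by
        rw [PySem.Int.mod_eq_emod_of_pos (by omega : (0:Int) < 2),
          PySem.Int.mod_eq_emod_of_pos (by omega : (0:Int) < 2)]
        omega
      rcases hcases with hcase | hcase
      · refine ⟨a, ?_, by omega, ha4⟩
        rw [sieveOdd, List.mem_filter, mem_sieveAb n hn, decide_eq_true_eq]
        exact ⟨⟨ha1, by omega, ha3⟩, hcase⟩
      · refine ⟨m - a, ?_, by omega, ?_⟩
        · rw [sieveOdd, List.mem_filter, mem_sieveAb n hn, decide_eq_true_eq]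
          exact ⟨⟨by omega, by omega, ha4⟩, hcase⟩
        · rw [show m - (m - a) = a from by omega]
          exact ha3
  · rw [if_neg hodd]
    rw [repB_eq_any _ (pairwise_sieveAb n), scan_iff n hn m hm hmn _
      (fun a ha => (mem_sieveAb n hn a).mp ha)]
    constructor
    · rintro ⟨a, ha, hle, habd2⟩
      obtain ⟨h1, h2, h3⟩ := (mem_sieveAb n hn a).mp ha
      by_cases h2a : 2 * a ≤ m
      · exact ⟨a, h1, h2a, h3, habd2⟩
      · refine ⟨m - a, by omega, by omega, habd2, ?_⟩
        rw [show m - (m - a) = a from by omega]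
        exact h3
    · rintro ⟨a, ha1, ha2, ha3, ha4⟩
      refine ⟨a, (mem_sieveAb n hn a).mpr ⟨ha1, by omega, ha3⟩, by omega, ha4⟩

theorem len_ab (limit : Int) :
    PySem.List.len (getAbundantNums limit) = (limit.toNat : Int) := by
  unfold getAbundantNums
  rw [PySem.List.foldl_append_singleton_eq_map, List.nil_append, PySem.List.len_eq,
    List.length_map, PySem.List.length_pyRange_one]
  omega

theorem foldl_if_skip (l : List Int) (p : Int → Bool) (a : Int) :
    l.foldl (fun acc x => if p x then acc else acc + x) a
      = a + (l.filter (fun x => !p x)).sum := by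
  have hbody : (fun (acc : Int) x => if p x then acc else acc + x)
      = fun acc x => acc + (if p x then 0 else x) := by
    funext acc x; split <;> simp
  rw [hbody, PySem.List.foldl_add, sum_map_ite_zero]

theorem foldl_if_add (l : List Int) (p : Int → Bool) (a : Int) :
    l.foldl (fun acc x => if p x then acc + x else acc) a
      = a + (l.filter p).sum := by
  have hbody : (fun (acc : Int) x => if p x then acc + x else acc)
      = fun acc x => acc + (if p x then x else 0) := by
    funext acc x; split <;> simp
  rw [hbody, PySem.List.foldl_add]
  congr 1
  induction l with
  | nil => rfl
  | cons x rest ih =>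
    rw [List.map_cons, List.sum_cons, List.filter_cons, ih]
    by_cases hx : p x <;> simp [hx]

-- ===== VERDICT (by name: the statement is the Claim_ definition above) =====
theorem non_abundant_sum_spec : Claim_equal_non_abundant_sum := by
  intro limit _
  unfold Spec_non_abundant_sum
  show non_abundant_sum limit = non_abundant_sum_alt limit
  by_cases hlim : limit ≤ 1
  · have hA : non_abundant_sum limit = 0 := by
      simp only [non_abundant_sum]
      rw [len_ab, PySem.List.pyRange_one_eq_nil (by omega)]
      rfl
    have hB : non_abundant_sum_alt limit = 0 := by
      simp only [non_abundant_sum_alt]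
      rw [if_pos (by omega : limit - 1 < 1)]
    rw [hA, hB]
  · simp only [non_abundant_sum, non_abundant_sum_alt]
    rw [if_neg (by omega : ¬ limit - 1 < 1)]
    rw [len_ab, show ((limit.toNat : Int)) = limit from by omega]
    rw [foldl_if_skip, zero_add, foldl_if_add, zero_add]
    rw [show (limit : Int) - 1 + 1 = limit from by omega]
    refine congrArg List.sum (List.filter_congr ?_)
    intro m hmem
    rw [PySem.List.mem_pyRange_one] at hmem
    have h1 := A_any_iff limit m hmem.1 (by omega)
    have h2 := B_rep_iff (limit - 1) (by omega) m hmem.1 (by omega)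
    unfold sieveOdd sieveAb sieveIsAb sieveSpd at h2
    rw [show (limit : Int) - 1 + 1 = limit from by omega] at h2
    exact congrArg (fun b => !b) (Bool.eq_iff_iff.mpr (h1.trans h2.symm))
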